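-- pv_equiv track=rewrite | github.com/engrmamun66/gy-ad-crawler-v6.0 | inc/functions.py | getYtLink
-- ===== SOURCE A (Python) =====
-- def getYtLink(text):
--     try:
--         arr = text.split('\n')
--         title = ''
--         url = ''
--         for line in arr:
--             if('http' in line):
--                 for word in line.split(" "):
--                     if 'http' in word:
--                         url = word
--                         break
--         return url.strip()
--     except: return ''
-- ===== SOURCE B (Python) =====
-- def getYtLink(text):
--     for line in reversed(text.split('\n')):
--         if 'http' in line:
--             for word in line.split(' '):
--                 if 'http' in word:
--                     return word.strip()
--     return ''
-- ===== Notes on version B (the rewrite author's own statement) =====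
-- stated objective: simpler
-- what changed: B walks the split lines in reverse and returns at the first http-bearing word instead of scanning every line and overwriting an accumulator; the dead title variable and the try/except (unreachable for str input) are dropped.
import Mathlib
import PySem

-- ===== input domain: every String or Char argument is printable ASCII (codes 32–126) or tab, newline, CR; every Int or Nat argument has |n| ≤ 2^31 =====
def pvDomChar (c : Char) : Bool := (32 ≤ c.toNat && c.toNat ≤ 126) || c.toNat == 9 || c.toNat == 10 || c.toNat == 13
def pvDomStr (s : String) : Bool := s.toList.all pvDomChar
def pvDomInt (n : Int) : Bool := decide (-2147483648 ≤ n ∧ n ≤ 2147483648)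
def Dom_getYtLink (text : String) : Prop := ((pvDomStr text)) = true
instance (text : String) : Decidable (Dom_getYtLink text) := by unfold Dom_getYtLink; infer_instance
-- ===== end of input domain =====

-- B replaces A's full forward scan with accumulator overwriting by a reverse walk that
-- returns at the first http-bearing word (objective: simpler; same O(n) cost).

-- ===== PORT A =====
-- str.split(sep) with a nonempty literal sep (split? is none only for sep = "")
def pvSplit (s sep : String) : List String := (PySem.Str.split? s sep).getD []

-- inner 'for word in line.split(" "): if 'http' in word: url = word; break'
def pvAInner (url : String) (ws : List String) : String :=
  match ws with
  | [] => url
  | w :: rest => if PySem.Str.isIn "http" w then w else pvAInner url rest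

def getYtLink (text : String) : String :=
  -- 'title' in A is dead; the try/except never fires for a str argument.
  let arr := pvSplit text "\n"
  let url := arr.foldl
    (fun url line =>
      if PySem.Str.isIn "http" line then pvAInner url (pvSplit line " ")
      else url) ""
  PySem.Str.strip url

-- ===== PORT B =====
-- inner 'for word in line.split(' '): if 'http' in word: return word.strip()'
def pvBInner (ws : List String) : Option String :=
  match ws with
  | [] => none
  | w :: rest => if PySem.Str.isIn "http" w then some w else pvBInner rest

def pvBGo (lines : List String) : String :=
  match lines with
  | [] => ""
  | line :: rest =>
    if PySem.Str.isIn "http" line then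
      match pvBInner (pvSplit line " ") with
      | some w => PySem.Str.strip w
      | none => pvBGo rest
    else pvBGo rest

def getYtLink_alt (text : String) : String :=
  pvBGo (pvSplit text "\n").reverse

-- ===== PRECONDITION & SPEC =====
def Spec_getYtLink (text : String) (out : String) : Prop := out = getYtLink_alt text
instance (text : String) (out : String) : Decidable (Spec_getYtLink text out) := by unfold Spec_getYtLink; infer_instance

-- ===== CLAIM (what is proved, stated in full; the proofs are below) =====
def Claim_equal_getYtLink : Prop := ∀ (text : String), Dom_getYtLink text → Spec_getYtLink text (getYtLink text)

-- ===== LEMMAS AND PROOFS =====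
-- per-line result: first http word of the line, provided the line mentions http
def pvG (line : String) : Option String :=
  if PySem.Str.isIn "http" line then pvBInner (pvSplit line " ") else none

theorem pvAInner_eq (u : String) (ws : List String) :
    pvAInner u ws = (pvBInner ws).getD u := by
  induction ws with
  | nil => rfl
  | cons w rest ih =>
    simp only [pvAInner, pvBInner]
    split_ifs <;> simp [ih]

theorem pvStep_eq (u line : String) :
    (if PySem.Str.isIn "http" line then pvAInner u (pvSplit line " ") else u)
      = (pvG line).getD u := by
  unfold pvG
  split_ifs with h
  · exact pvAInner_eq u _
  · rfl

theorem pvFoldl_rev (ys : List String) (u : String) :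
    ys.reverse.foldl (fun acc line => (pvG line).getD acc) u
      = (ys.findSome? pvG).getD u := by
  induction ys generalizing u with
  | nil => rfl
  | cons l ls ih =>
    simp only [List.reverse_cons, List.foldl_append, List.foldl_cons, List.foldl_nil,
      List.findSome?_cons]
    cases h : pvG l with
    | none => simp [ih]
    | some w => simp [ih]

theorem pvBGo_eq (ys : List String) :
    pvBGo ys = ((ys.findSome? pvG).map PySem.Str.strip).getD "" := by
  induction ys with
  | nil => rfl
  | cons l ls ih =>
    cases h : PySem.Str.isIn "http" l with
    | false =>
      simp at h
      simp [pvBGo, pvG, h, ih]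
    | true =>
      simp at h
      cases hb : pvBInner (pvSplit l " ") <;>
        simp [pvBGo, pvG, h, hb, ih]

-- ===== VERDICT (by name: the statement is the Claim_ definition above) =====
theorem getYtLink_spec : Claim_equal_getYtLink := by
  intro text _
  have hstep : (fun (url line : String) =>
      if PySem.Str.isIn "http" line then pvAInner url (pvSplit line " ") else url)
      = fun acc line => (pvG line).getD acc := by
    funext u line; exact pvStep_eq u line
  show PySem.Str.strip ((pvSplit text "\n").foldl
      (fun url line =>
        if PySem.Str.isIn "http" line then pvAInner url (pvSplit line " ") else url) "")
    = pvBGo (pvSplit text "\n").reverse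
  rw [hstep, pvBGo_eq]
  have h := pvFoldl_rev (pvSplit text "\n").reverse ""
  rw [List.reverse_reverse] at h
  rw [h]
  cases (pvSplit text "\n").reverse.findSome? pvG with
  | none => simp; rfl
  | some w => simp
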